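-- pv_equiv track=rewrite | github.com/gautamkmr/Code | vmware/countBlock.py | countBlock
-- ===== SOURCE A (Python) =====
-- def dfs(arr, i, j, r, c):
--     if i < 0 or j < 0 or i >= r or j >= c or arr[i][j]==0:
--         return 0
--     arr[i][j] = 0 #turnning off the bit
--     count = 1
--     count += dfs(arr, i + 1, j, r, c)
--     count += dfs(arr, i - 1, j, r, c)
--     count += dfs(arr, i, j + 1, r, c)
--     count += dfs(arr, i, j - 1, r, c)
--     return count
--
-- def countBlock(arr):
--     if arr is None:
--         return 0
--     r = len(arr)
--     if r == 0:
--         return 0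
--     c = len(arr[0])
--     ans =  0
--     for i in range(r):
--         for j in range(c):
--             if arr[i][j] == 1:
--                 tmp = dfs(arr, i, j, r, c)
--                 ans = max(tmp, ans)
--     return ans
-- ===== SOURCE B (Python) =====
-- def flood(arr, i0, j0, r, c):
--     # iterative flood fill with an explicit stack; zeroes every visited cell
--     count = 0
--     stack = [(i0, j0)]
--     while stack:
--         i, j = stack.pop()
--         if i < 0 or j < 0 or i >= r or j >= c or arr[i][j] == 0:
--             continue
--         arr[i][j] = 0
--         count += 1
--         stack.append((i, j - 1))
--         stack.append((i, j + 1))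
--         stack.append((i - 1, j))
--         stack.append((i + 1, j))
--     return count
--
-- def countBlock(arr):
--     if arr is None:
--         return 0
--     r = len(arr)
--     if r == 0:
--         return 0
--     c = len(arr[0])
--     ans = 0
--     for i in range(r):
--         for j in range(c):
--             if arr[i][j] == 1:
--                 ans = max(flood(arr, i, j, r, c), ans)
--     return ans
-- ===== Notes on version B (the rewrite author's own statement) =====
-- stated objective: alternative
-- what changed: The recursive dfs helper is replaced by an iterative flood fill driven by an explicit stack of cells (the outer scan is kept); same zeroing of visited cells, no Python recursion.
import Mathlib
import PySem

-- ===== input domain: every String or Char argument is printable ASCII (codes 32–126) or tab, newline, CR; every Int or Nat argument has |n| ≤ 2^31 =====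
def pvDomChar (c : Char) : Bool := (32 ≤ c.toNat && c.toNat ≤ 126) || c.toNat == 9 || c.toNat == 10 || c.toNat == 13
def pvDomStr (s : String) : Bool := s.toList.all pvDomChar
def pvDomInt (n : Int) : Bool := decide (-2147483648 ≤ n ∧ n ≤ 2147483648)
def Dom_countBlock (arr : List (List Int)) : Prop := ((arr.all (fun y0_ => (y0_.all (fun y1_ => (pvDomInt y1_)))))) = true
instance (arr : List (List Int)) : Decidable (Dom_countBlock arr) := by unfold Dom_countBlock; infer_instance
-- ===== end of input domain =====

-- B replaces the recursive dfs by an iterative explicit-stack flood fill (same outer scan, same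
-- in-place zeroing of visited cells); equivalence is about the return value, and both versions
-- leave the grid in the same final state. ('arr is None' has no counterpart in the List type.)

-- ===== PORT A =====
-- arr[i][j] as read by both programs; only evaluated under 0 ≤ i < r, 0 ≤ j < c (the guards
-- check this first), where it is exact under Pre_ (every row has length ≥ c).
def pvCell (arr : List (List Int)) (i j : Int) : Int :=
  ((PySem.List.pyGet? ((PySem.List.pyGet? arr i).getD []) j)).getD 0

-- arr[i][j] = 0 ; only evaluated with 0 ≤ i, 0 ≤ j in range (after the guard), where it is exact.
def pvZero (arr : List (List Int)) (i j : Int) : List (List Int) :=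
  arr.set i.toNat (((PySem.List.pyGet? arr i).getD []).set j.toNat 0)

-- number of nonzero entries of a row / of the grid (termination measure and fuel bound)
def pvNz (row : List Int) : Nat := row.countP (fun x => decide (x ≠ 0))
def pvNonzero (arr : List (List Int)) : Nat := (arr.map pvNz).sum

-- zeroing a nonzero cell strictly decreases the nonzero count (used by loopB's termination proof)
theorem pvNz_set_lt (l : List Int) (n : Nat) (v : Int) (h : l[n]? = some v) (hv : v ≠ 0) :
    pvNz (l.set n 0) < pvNz l := by
  induction l generalizing n with
  | nil => simp at h
  | cons a t ih =>
    cases n with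
    | zero =>
      simp at h
      subst h
      simp [pvNz, hv]
    | succ m =>
      simp at h
      have := ih m h
      simp [pvNz, List.countP_cons] at *
      omega

theorem pvNonzero_set_lt (arr : List (List Int)) (n : Nat) (newrow r0 : List Int)
    (h : arr[n]? = some r0) (hlt : pvNz newrow < pvNz r0) :
    pvNonzero (arr.set n newrow) < pvNonzero arr := by
  induction arr generalizing n with
  | nil => simp at h
  | cons a t ih =>
    cases n with
    | zero =>
      simp at h
      subst h
      simp [pvNonzero]
      omega
    | succ m =>
      simp at h
      have := ih m h
      simp [pvNonzero] at *
      omega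

theorem pvZero_nonzero_lt (arr : List (List Int)) (i j : Int)
    (hi : 0 ≤ i) (hj : 0 ≤ j) (h : pvCell arr i j ≠ 0) :
    pvNonzero (pvZero arr i j) < pvNonzero arr := by
  unfold pvCell at h
  rcases hrow : PySem.List.pyGet? arr i with _ | row
  · rw [hrow] at h
    have hnil : PySem.List.pyGet? ([] : List Int) j = none := by
      rw [PySem.List.pyGet?_of_nonneg _ hj]; simp
    simp [hnil] at h
  rw [hrow] at h
  simp only [Option.getD_some] at h
  rcases hv : PySem.List.pyGet? row j with _ | v
  · rw [hv] at h; simp at h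
  rw [hv] at h
  simp only [Option.getD_some] at h
  have hrow' : arr[i.toNat]? = some row := by
    rw [PySem.List.pyGet?_of_nonneg _ hi] at hrow; exact hrow
  have hv' : row[j.toNat]? = some v := by
    rw [PySem.List.pyGet?_of_nonneg _ hj] at hv; exact hv
  have hlt : pvNz (row.set j.toNat 0) < pvNz row := pvNz_set_lt row j.toNat v hv' h
  unfold pvZero
  rw [hrow]
  exact pvNonzero_set_lt arr i.toNat _ row hrow' (by simpa using hlt)

-- literal port of A's recursive dfs; the fuel argument is only a totality device, the top-level
-- call supplies pvNonzero arr + 1, which never runs out (each recursion level zeroes a cell)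
def dfsF : Nat → List (List Int) → Int → Int → Int → Int → Int × List (List Int)
  | 0, arr, _, _, _, _ => (0, arr)
  | fuel+1, arr, i, j, r, c =>
    if i < 0 ∨ j < 0 ∨ r ≤ i ∨ c ≤ j ∨ pvCell arr i j = 0 then (0, arr)
    else
      let a0 := pvZero arr i j
      let p1 := dfsF fuel a0 (i+1) j r c
      let p2 := dfsF fuel p1.2 (i-1) j r c
      let p3 := dfsF fuel p2.2 i (j+1) r c
      let p4 := dfsF fuel p3.2 i (j-1) r c
      (1 + p1.1 + p2.1 + p3.1 + p4.1, p4.2)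

def countBlock (arr : List (List Int)) : Int :=
  let r : Int := arr.length
  if r = 0 then 0
  else
    let c : Int := ((((PySem.List.pyGet? arr 0).getD []).length : Int))
    ((PySem.List.pyRange 0 r 1).foldl (fun st i =>
      (PySem.List.pyRange 0 c 1).foldl (fun st j =>
        if pvCell st.2 i j = 1 then
          let p := dfsF (pvNonzero st.2 + 1) st.2 i j r c
          (max p.1 st.1, p.2)
        else st) st) ((0 : Int), arr)).1

-- ===== PORT B =====
-- the while-stack loop of Source B's flood: state = (grid, stack, count)
def loopB (arr : List (List Int)) (stack : List (Int × Int)) (r c : Int) (cnt : Int) :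
    Int × List (List Int) :=
  match stack with
  | [] => (cnt, arr)
  | (i, j) :: rest =>
    if h : i < 0 ∨ j < 0 ∨ r ≤ i ∨ c ≤ j ∨ pvCell arr i j = 0 then
      loopB arr rest r c cnt
    else
      loopB (pvZero arr i j) ((i+1, j) :: (i-1, j) :: (i, j+1) :: (i, j-1) :: rest) r c (cnt + 1)
termination_by 5 * pvNonzero arr + stack.length
decreasing_by
  · simp only [List.length_cons]
    omega
  · push_neg at h
    have := pvZero_nonzero_lt arr i j (by omega) (by omega) h.2.2.2.2
    simp
    omega

def pvFlood (arr : List (List Int)) (i j r c : Int) : Int × List (List Int) :=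
  loopB arr [(i, j)] r c 0

def countBlock_alt (arr : List (List Int)) : Int :=
  let r : Int := arr.length
  if r = 0 then 0
  else
    let c : Int := ((((PySem.List.pyGet? arr 0).getD []).length : Int))
    ((PySem.List.pyRange 0 r 1).foldl (fun st i =>
      (PySem.List.pyRange 0 c 1).foldl (fun st j =>
        if pvCell st.2 i j = 1 then
          let p := pvFlood st.2 i j r c
          (max p.1 st.1, p.2)
        else st) st) ((0 : Int), arr)).1

-- ===== PRECONDITION & SPEC =====
-- Pre_ excludes exactly the ragged grids on which A raises IndexError: some row shorter than
-- row 0 (every cell arr[i][j], j < len(arr[0]), is read by the outer scan).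
def Pre_countBlock (arr : List (List Int)) : Prop :=
  ∀ row ∈ arr, (arr.headD []).length ≤ row.length
instance (arr : List (List Int)) : Decidable (Pre_countBlock arr) := by
  unfold Pre_countBlock; infer_instance

def pvWitness_countBlock : List (List Int) := [[1, 1, 0], [0, 1, 0]]

def Spec_countBlock (arr : List (List Int)) (out : Int) : Prop := out = countBlock_alt arr
instance (arr : List (List Int)) (out : Int) : Decidable (Spec_countBlock arr out) := by
  unfold Spec_countBlock; infer_instance

-- ===== CLAIM (what is proved, stated in full; the proofs are below) =====
def Claim_equal_countBlock : Prop :=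
  ∀ (arr : List (List Int)), Dom_countBlock arr → Pre_countBlock arr →
    Spec_countBlock arr (countBlock arr)

-- ===== LEMMAS AND PROOFS =====

-- dfs never increases the number of nonzero cells
theorem dfsF_nonzero_le (fuel : Nat) :
    ∀ (arr : List (List Int)) (i j r c : Int),
      pvNonzero (dfsF fuel arr i j r c).2 ≤ pvNonzero arr := by
  induction fuel with
  | zero => intro arr i j r c; simp [dfsF]
  | succ n ih =>
    intro arr i j r c
    by_cases h : i < 0 ∨ j < 0 ∨ r ≤ i ∨ c ≤ j ∨ pvCell arr i j = 0
    · simp [dfsF, h]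
    · rw [dfsF]
      simp only [h, if_false]
      push_neg at h
      have h0 := pvZero_nonzero_lt arr i j (by omega) (by omega) h.2.2.2.2
      have h1 := ih (pvZero arr i j) (i+1) j r c
      have h2 := ih (dfsF n (pvZero arr i j) (i+1) j r c).2 (i-1) j r c
      have h3 := ih (dfsF n (dfsF n (pvZero arr i j) (i+1) j r c).2 (i-1) j r c).2 i (j+1) r c
      have h4 := ih (dfsF n (dfsF n (dfsF n (pvZero arr i j) (i+1) j r c).2 (i-1) j r c).2 i (j+1) r c).2 i (j-1) r c
      omega

-- central correspondence: running the stack loop with (i,j) on top equals running A's dfs on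
-- (i,j) first and then the loop on the rest of the stack (the stack pops neighbours in exactly
-- A's recursion order)
theorem loop_dfs (fuel : Nat) :
    ∀ (arr : List (List Int)) (i j r c : Int) (rest : List (Int × Int)) (cnt : Int),
      pvNonzero arr < fuel →
      loopB arr ((i, j) :: rest) r c cnt =
        loopB (dfsF fuel arr i j r c).2 rest r c (cnt + (dfsF fuel arr i j r c).1) := by
  induction fuel with
  | zero => intro arr i j r c rest cnt hf; omega
  | succ n ih =>
    intro arr i j r c rest cnt hf
    rw [loopB, dfsF]
    by_cases h : i < 0 ∨ j < 0 ∨ r ≤ i ∨ c ≤ j ∨ pvCell arr i j = 0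
    · simp only [h, dite_true, if_true]
      norm_num
    · simp only [h, dite_false, if_false]
      push_neg at h
      have h0 := pvZero_nonzero_lt arr i j (by omega) (by omega) h.2.2.2.2
      have b1 : pvNonzero (pvZero arr i j) < n := by omega
      rw [ih (pvZero arr i j) (i+1) j r c _ _ b1]
      have b2 : pvNonzero (dfsF n (pvZero arr i j) (i+1) j r c).2 < n :=
        lt_of_le_of_lt (dfsF_nonzero_le n _ _ _ _ _) b1
      rw [ih _ (i-1) j r c _ _ b2]
      have b3 : pvNonzero (dfsF n (dfsF n (pvZero arr i j) (i+1) j r c).2 (i-1) j r c).2 < n :=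
        lt_of_le_of_lt (dfsF_nonzero_le n _ _ _ _ _) b2
      rw [ih _ i (j+1) r c _ _ b3]
      have b4 : pvNonzero (dfsF n (dfsF n (dfsF n (pvZero arr i j) (i+1) j r c).2 (i-1) j r c).2 i (j+1) r c).2 < n :=
        lt_of_le_of_lt (dfsF_nonzero_le n _ _ _ _ _) b3
      rw [ih _ i (j-1) r c _ _ b4]
      congr 1
      ring

theorem pvFlood_eq (arr : List (List Int)) (i j r c : Int) :
    pvFlood arr i j r c = dfsF (pvNonzero arr + 1) arr i j r c := by
  unfold pvFlood
  rw [loop_dfs (pvNonzero arr + 1) arr i j r c [] 0 (by omega), loopB]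
  simp

-- ===== VERDICT (by name: the statement is the Claim_ definition above) =====
set_option maxHeartbeats 1000000 in
theorem countBlock_spec : Claim_equal_countBlock := by
  intro arr _ _
  unfold Spec_countBlock countBlock countBlock_alt
  simp only [pvFlood_eq]
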